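-- pv_equiv track=rewrite | github.com/esc4n0rx/WinP2P | utils/updater.py | _get_asset_download_url
-- ===== SOURCE A (Python) =====
-- def _get_asset_download_url(release_info):
--     """Obtém a URL do arquivo executável da release"""
--     assets = release_info.get('assets', [])
--     for asset in assets:
--         if asset.get('name', '').endswith('.exe') and 'WinP2P' in asset.get('name', ''):
--             return asset.get('browser_download_url')
--
--     # Se não encontrou o executável específico, procura por ZIP como backup
--     for asset in assets:
--         if asset.get('name', '').endswith('.zip'):
--             return asset.get('browser_download_url')
--
--     # Se não encontrou nenhum asset específico, usa a URL de download do zip do código fonte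
--     return release_info.get('zipball_url')
-- ===== SOURCE B (Python) =====
-- _MISSING = object()
--
-- def _get_asset_download_url(release_info):
--     """Single pass over assets keeping the first exe match and first zip match."""
--     exe = zipv = _MISSING
--     for asset in release_info.get('assets', []):
--         name = asset.get('name', '')
--         if exe is _MISSING and name.endswith('.exe') and 'WinP2P' in name:
--             exe = asset.get('browser_download_url')
--         if zipv is _MISSING and name.endswith('.zip'):
--             zipv = asset.get('browser_download_url')
--     if exe is not _MISSING:
--         return exe
--     if zipv is not _MISSING:
--         return zipv
--     return release_info.get('zipball_url')
-- ===== Notes on version B (the rewrite author's own statement) =====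
-- stated objective: alternative
-- what changed: Replaces A's two sequential scans of the asset list by one single pass that records the first exe match and the first zip match in sentinel-flagged accumulators and picks exe over zip afterwards; B's Python also returns release_info.get('zipball_url') on the fallback branch, exactly like A.
-- outside the precondition, e.g. on _get_asset_download_url({'zipball_url': [], 'assets': []}): A returns [], B returns []
import Mathlib
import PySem

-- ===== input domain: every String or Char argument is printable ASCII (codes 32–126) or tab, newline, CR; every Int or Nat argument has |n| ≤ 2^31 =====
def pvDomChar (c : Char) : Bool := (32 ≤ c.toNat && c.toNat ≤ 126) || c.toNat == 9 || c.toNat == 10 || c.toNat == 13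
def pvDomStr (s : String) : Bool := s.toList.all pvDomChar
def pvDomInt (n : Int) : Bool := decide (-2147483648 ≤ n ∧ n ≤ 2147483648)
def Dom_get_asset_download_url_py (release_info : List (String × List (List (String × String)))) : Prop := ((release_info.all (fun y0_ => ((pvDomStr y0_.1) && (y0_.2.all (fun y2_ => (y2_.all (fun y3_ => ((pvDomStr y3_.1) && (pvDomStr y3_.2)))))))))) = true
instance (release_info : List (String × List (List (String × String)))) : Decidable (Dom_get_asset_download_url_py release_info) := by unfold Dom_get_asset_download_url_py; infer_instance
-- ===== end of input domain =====

-- B replaces A's two sequential scans of the assets list by one single pass with two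
-- sentinel accumulators (first exe match, first zip match); equivalence of return values.
-- In Python, B's fallback branch returns release_info.get('zipball_url') exactly like A.

-- shared helpers (Python: asset.get('name',''), asset.get('browser_download_url'), the two tests)
def pvName (asset : List (String × String)) : String :=
  PySem.Dict.getD (PySem.Dict.mk asset) "name" ""

def pvUrl (asset : List (String × String)) : Option String :=
  PySem.Dict.get? (PySem.Dict.mk asset) "browser_download_url"

def pvIsExe (asset : List (String × String)) : Bool :=
  PySem.Str.endswith (pvName asset) ".exe" && PySem.Str.isIn "WinP2P" (pvName asset)

def pvIsZip (asset : List (String × String)) : Bool :=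
  PySem.Str.endswith (pvName asset) ".zip"

-- ===== PORT A =====
-- first loop: return on the first exe asset (outer none = loop fell through)
def pvLoopExe : List (List (String × String)) → Option (Option String)
  | [] => none
  | a :: rest => if pvIsExe a then some (pvUrl a) else pvLoopExe rest

-- second loop: return on the first zip asset
def pvLoopZip : List (List (String × String)) → Option (Option String)
  | [] => none
  | a :: rest => if pvIsZip a then some (pvUrl a) else pvLoopZip rest

def get_asset_download_url_py (release_info : List (String × List (List (String × String)))) : Option String :=
  let assets := PySem.Dict.getD (PySem.Dict.mk release_info) "assets" []
  match pvLoopExe assets with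
  | some u => u
  | none =>
    match pvLoopZip assets with
    | some u => u
    | none => none
      -- Python here returns release_info.get('zipball_url'): under the task's fixed typing
      -- that value is a List (List (String × String)), not an Option String, so the port
      -- cannot represent it; Pre_ excludes reaching this point with the key present.

-- ===== PORT B =====
-- one pass; each component is 'none' while its sentinel is still unset
def pvStep (st : Option (Option String) × Option (Option String))
    (asset : List (String × String)) : Option (Option String) × Option (Option String) :=
  ((if st.1.isNone && pvIsExe asset then some (pvUrl asset) else st.1),
   (if st.2.isNone && pvIsZip asset then some (pvUrl asset) else st.2))

def get_asset_download_url_py_alt (release_info : List (String × List (List (String × String)))) : Option String :=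
  let assets := PySem.Dict.getD (PySem.Dict.mk release_info) "assets" []
  match assets.foldl pvStep (none, none) with
  | (some u, _) => u
  | (none, some u) => u
  | (none, none) => none
      -- B's Python here returns release_info.get('zipball_url'), exactly A's value; the port
      -- cannot represent that list value (see Port A), so Pre_ excludes the key being present.

-- ===== PRECONDITION & SPEC =====
-- Pre_ excludes only the inputs where no asset matches either test and 'zipball_url' is present:
-- there A and B both RETURN the same value (the raw zipball_url entry), but under the task's
-- fixed input typing that value is a List (List (String × String)) — not a value of the declared
-- return type Option String — so neither port can express it; A and B agree there in Python.
def Pre_get_asset_download_url_py (release_info : List (String × List (List (String × String)))) : Prop :=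
  ((PySem.Dict.getD (PySem.Dict.mk release_info) "assets" []).any (fun a => pvIsExe a || pvIsZip a)
    || !(PySem.Dict.mk release_info).contains "zipball_url") = true

instance (release_info : List (String × List (List (String × String)))) : Decidable (Pre_get_asset_download_url_py release_info) := by unfold Pre_get_asset_download_url_py; infer_instance

def pvWitness_get_asset_download_url_py : (List (String × List (List (String × String)))) :=
  [("assets", [[("name", "WinP2P-v1.exe"), ("browser_download_url", "http://x/WinP2P.exe")]])]

def Spec_get_asset_download_url_py (release_info : List (String × List (List (String × String)))) (out : Option String) : Prop := out = get_asset_download_url_py_alt release_info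
instance (release_info : List (String × List (List (String × String)))) (out : Option String) : Decidable (Spec_get_asset_download_url_py release_info out) := by unfold Spec_get_asset_download_url_py; infer_instance

-- ===== CLAIM (what is proved, stated in full; the proofs are below) =====
def Claim_equal_get_asset_download_url_py : Prop := ∀ (release_info : List (String × List (List (String × String)))), Dom_get_asset_download_url_py release_info → Pre_get_asset_download_url_py release_info → Spec_get_asset_download_url_py release_info (get_asset_download_url_py release_info)

-- ===== LEMMAS AND PROOFS =====

-- the first component of the fold keeps an already-set sentinel and otherwise equals A's first loop
theorem pvFold_fst (assets : List (List (String × String))) :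
    ∀ st : Option (Option String) × Option (Option String),
      (assets.foldl pvStep st).1 = st.1.or (pvLoopExe assets) := by
  induction assets with
  | nil => intro st; simp [pvLoopExe]
  | cons a rest ih =>
    intro st
    rw [List.foldl_cons, ih]
    rcases st with ⟨st1, st2⟩
    cases st1 with
    | none => simp only [pvStep]; simp [pvLoopExe]; split <;> simp
    | some u => simp [pvStep]

-- the second component likewise equals A's second loop
theorem pvFold_snd (assets : List (List (String × String))) :
    ∀ st : Option (Option String) × Option (Option String),
      (assets.foldl pvStep st).2 = st.2.or (pvLoopZip assets) := by
  induction assets with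
  | nil => intro st; simp [pvLoopZip]
  | cons a rest ih =>
    intro st
    rw [List.foldl_cons, ih]
    rcases st with ⟨st1, st2⟩
    cases st2 with
    | none => simp only [pvStep]; simp [pvLoopZip]; split <;> simp
    | some u => simp [pvStep]

-- ===== VERDICT (by name: the statement is the Claim_ definition above) =====
theorem get_asset_download_url_py_spec : Claim_equal_get_asset_download_url_py := by
  unfold Claim_equal_get_asset_download_url_py
  intro ri _ _
  unfold Spec_get_asset_download_url_py
  unfold get_asset_download_url_py get_asset_download_url_py_alt
  dsimp only
  have h1 := pvFold_fst (PySem.Dict.getD (PySem.Dict.mk ri) "assets" []) (none, none)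
  have h2 := pvFold_snd (PySem.Dict.getD (PySem.Dict.mk ri) "assets" []) (none, none)
  rcases hst : (PySem.Dict.getD (PySem.Dict.mk ri) "assets" []).foldl pvStep (none, none) with ⟨s1, s2⟩
  rw [hst] at h1 h2
  simp only [Option.none_or] at h1 h2
  rw [← h1, ← h2]
  cases s1 <;> cases s2 <;> rfl
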